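-- pv_equiv track=rewrite | github.com/kaitwalla/hydraflow | src/stream_parser.py | _map_top_level_usage_scalars
-- ===== SOURCE A (Python) =====
-- from typing import Any
--
-- def _map_top_level_usage_scalars(event: dict[str, Any]) -> dict[str, int]:
--     """Map only top-level scalar usage keys (avoid nested tool payload false positives)."""
--     totals: dict[str, int] = {}
--     for key, value in event.items():
--         if not isinstance(value, (int, float)):
--             continue
--         canonical = _canonical_usage_key(str(key))
--         if not canonical:
--             continue
--         totals[canonical] = max(totals.get(canonical, 0), int(value))
--     return totals
--
-- def _canonical_usage_key(raw_key: str) -> str: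
--     """Map backend-specific usage keys to canonical names."""
--     key = raw_key.lower()
--     if key in {"input_tokens", "prompt_tokens", "inputtokencount", "input"}:
--         return "input_tokens"
--     if key in {"output_tokens", "completion_tokens", "outputtokencount", "output"}:
--         return "output_tokens"
--     if key in {
--         "cache_creation_input_tokens",
--         "cache_creation_tokens",
--         "cachewriteinputtokens",
--         "cachewrite",
--     }:
--         return "cache_creation_input_tokens"
--     if key in {
--         "cache_read_input_tokens",
--         "cache_read_tokens",
--         "cached_tokens",
--         "cached_input_tokens",
--         "cachereadinputtokens",
--         "cacheread",
--     }:
--         return "cache_read_input_tokens"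
--     if key in {"total_tokens", "totaltokencount", "totaltokens"}:
--         return "total_tokens"
--     return ""
-- ===== SOURCE B (Python) =====
-- _ALIASES = {
--     "input_tokens": "input_tokens", "prompt_tokens": "input_tokens",
--     "inputtokencount": "input_tokens", "input": "input_tokens",
--     "output_tokens": "output_tokens", "completion_tokens": "output_tokens",
--     "outputtokencount": "output_tokens", "output": "output_tokens",
--     "cache_creation_input_tokens": "cache_creation_input_tokens",
--     "cache_creation_tokens": "cache_creation_input_tokens",
--     "cachewriteinputtokens": "cache_creation_input_tokens",
--     "cachewrite": "cache_creation_input_tokens",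
--     "cache_read_input_tokens": "cache_read_input_tokens",
--     "cache_read_tokens": "cache_read_input_tokens",
--     "cached_tokens": "cache_read_input_tokens",
--     "cached_input_tokens": "cache_read_input_tokens",
--     "cachereadinputtokens": "cache_read_input_tokens",
--     "cacheread": "cache_read_input_tokens",
--     "total_tokens": "total_tokens", "totaltokencount": "total_tokens",
--     "totaltokens": "total_tokens",
-- }
--
--
-- def _map_top_level_usage_scalars(event):
--     """Two-phase: group scalar values by canonical key via an alias table, then reduce each group."""
--     groups: dict = {}
--     for key, value in event.items():
--         if isinstance(value, (int, float)):
--             canonical = _ALIASES.get(str(key).lower())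
--             if canonical is not None:
--                 groups[canonical] = groups.get(canonical, []) + [int(value)]
--     return {canonical: max(0, *values) for canonical, values in groups.items()}
-- ===== Notes on version B (the rewrite author's own statement) =====
-- stated objective: simpler
-- what changed: Replaced A's per-key if-chain classifier with a module-level alias lookup table and replaced the single-pass running max with a two-phase group-then-reduce (collect values per canonical key, then take max(0, *values) per group).
import Mathlib
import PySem

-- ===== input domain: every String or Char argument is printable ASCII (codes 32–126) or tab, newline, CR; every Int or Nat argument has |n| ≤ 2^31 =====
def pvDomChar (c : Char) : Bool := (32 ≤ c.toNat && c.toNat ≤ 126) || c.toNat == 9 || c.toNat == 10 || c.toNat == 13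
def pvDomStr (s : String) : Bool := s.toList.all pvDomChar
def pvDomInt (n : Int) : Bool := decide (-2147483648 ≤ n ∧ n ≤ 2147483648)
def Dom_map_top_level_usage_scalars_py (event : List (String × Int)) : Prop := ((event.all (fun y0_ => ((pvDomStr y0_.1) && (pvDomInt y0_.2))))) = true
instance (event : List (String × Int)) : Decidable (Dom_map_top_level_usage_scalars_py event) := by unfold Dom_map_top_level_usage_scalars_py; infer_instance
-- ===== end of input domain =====

-- B replaces A's if-chain classifier and running max with an alias lookup table and a
-- two-phase group-then-reduce; objective: simpler/alternative (same asymptotic cost).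
-- The Lean equivalence is about the RETURN value (neither program mutates its argument).

-- ===== PORT A =====
-- port of _canonical_usage_key: the lowered key is tested against each alias set in order
def pyCanonicalUsageKey (rawKey : String) : String :=
  let key := PySem.Str.lower rawKey
  if key ∈ ["input_tokens", "prompt_tokens", "inputtokencount", "input"] then "input_tokens"
  else if key ∈ ["output_tokens", "completion_tokens", "outputtokencount", "output"] then "output_tokens"
  else if key ∈ ["cache_creation_input_tokens", "cache_creation_tokens", "cachewriteinputtokens", "cachewrite"] then "cache_creation_input_tokens"
  else if key ∈ ["cache_read_input_tokens", "cache_read_tokens", "cached_tokens", "cached_input_tokens", "cachereadinputtokens", "cacheread"] then "cache_read_input_tokens"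
  else if key ∈ ["total_tokens", "totaltokencount", "totaltokens"] then "total_tokens"
  else ""

-- every value is an Int here, so Python's isinstance(value, (int, float)) guard is always true
-- and int(value) = value
def map_top_level_usage_scalars_py (event : List (String × Int)) : List (String × Int) :=
  (event.foldl
    (fun (totals : PySem.Dict String Int) kv =>
      let canonical := pyCanonicalUsageKey kv.1
      if canonical = "" then totals
      else totals.insert canonical (max (totals.getD canonical 0) kv.2))
    PySem.Dict.empty).items

-- ===== PORT B =====
-- port of the module-level _ALIASES dict literal
def altAliases : PySem.Dict String String := PySem.Dict.ofList
  [("input_tokens", "input_tokens"), ("prompt_tokens", "input_tokens"),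
   ("inputtokencount", "input_tokens"), ("input", "input_tokens"),
   ("output_tokens", "output_tokens"), ("completion_tokens", "output_tokens"),
   ("outputtokencount", "output_tokens"), ("output", "output_tokens"),
   ("cache_creation_input_tokens", "cache_creation_input_tokens"),
   ("cache_creation_tokens", "cache_creation_input_tokens"),
   ("cachewriteinputtokens", "cache_creation_input_tokens"),
   ("cachewrite", "cache_creation_input_tokens"),
   ("cache_read_input_tokens", "cache_read_input_tokens"),
   ("cache_read_tokens", "cache_read_input_tokens"),
   ("cached_tokens", "cache_read_input_tokens"),
   ("cached_input_tokens", "cache_read_input_tokens"),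
   ("cachereadinputtokens", "cache_read_input_tokens"),
   ("cacheread", "cache_read_input_tokens"),
   ("total_tokens", "total_tokens"), ("totaltokencount", "total_tokens"),
   ("totaltokens", "total_tokens")]

-- phase 1: group the scalar values by canonical key; phase 2: reduce each group with max seeded by 0
def map_top_level_usage_scalars_py_alt (event : List (String × Int)) : List (String × Int) :=
  let groups : PySem.Dict String (List Int) :=
    event.foldl
      (fun g kv =>
        match altAliases.get? (PySem.Str.lower kv.1) with
        | none => g
        | some canonical => g.insert canonical (g.getD canonical [] ++ [kv.2]))
      PySem.Dict.empty
  groups.items.map (fun p => (p.1, p.2.foldl max 0))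

-- ===== PRECONDITION & SPEC =====
def Spec_map_top_level_usage_scalars_py (event : List (String × Int)) (out : List (String × Int)) : Prop := out = map_top_level_usage_scalars_py_alt event
instance (event : List (String × Int)) (out : List (String × Int)) : Decidable (Spec_map_top_level_usage_scalars_py event out) := by unfold Spec_map_top_level_usage_scalars_py; infer_instance

-- ===== CLAIM (what is proved, stated in full; the proofs are below) =====
def Claim_equal_map_top_level_usage_scalars_py : Prop := ∀ (event : List (String × Int)), Dom_map_top_level_usage_scalars_py event → Spec_map_top_level_usage_scalars_py event (map_top_level_usage_scalars_py event)

-- ===== LEMMAS AND PROOFS =====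

-- the alias table agrees with A's if-chain classifier
set_option maxHeartbeats 2000000 in
theorem altAliases_get_eq_canon (k : String) :
    altAliases.get? (PySem.Str.lower k) =
      (if pyCanonicalUsageKey k = "" then none else some (pyCanonicalUsageKey k)) := by
  have h : altAliases = PySem.Dict.mk
    [("input_tokens", "input_tokens"),
     ("prompt_tokens", "input_tokens"),
     ("inputtokencount", "input_tokens"),
     ("input", "input_tokens"),
     ("output_tokens", "output_tokens"),
     ("completion_tokens", "output_tokens"),
     ("outputtokencount", "output_tokens"),
     ("output", "output_tokens"),
     ("cache_creation_input_tokens", "cache_creation_input_tokens"),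
     ("cache_creation_tokens", "cache_creation_input_tokens"),
     ("cachewriteinputtokens", "cache_creation_input_tokens"),
     ("cachewrite", "cache_creation_input_tokens"),
     ("cache_read_input_tokens", "cache_read_input_tokens"),
     ("cache_read_tokens", "cache_read_input_tokens"),
     ("cached_tokens", "cache_read_input_tokens"),
     ("cached_input_tokens", "cache_read_input_tokens"),
     ("cachereadinputtokens", "cache_read_input_tokens"),
     ("cacheread", "cache_read_input_tokens"),
     ("total_tokens", "total_tokens"),
     ("totaltokencount", "total_tokens"),
     ("totaltokens", "total_tokens")] := by decide
  unfold pyCanonicalUsageKey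
  rw [h]
  generalize PySem.Str.lower k = s
  by_cases hs : s ∈ ["input_tokens", "prompt_tokens", "inputtokencount", "input", "output_tokens", "completion_tokens", "outputtokencount", "output", "cache_creation_input_tokens", "cache_creation_tokens", "cachewriteinputtokens", "cachewrite", "cache_read_input_tokens", "cache_read_tokens", "cached_tokens", "cached_input_tokens", "cachereadinputtokens", "cacheread", "total_tokens", "totaltokencount", "totaltokens"]
  · simp only [List.mem_cons, List.not_mem_nil, or_false] at hs
    rcases hs with rfl|rfl|rfl|rfl|rfl|rfl|rfl|rfl|rfl|rfl|rfl|rfl|rfl|rfl|rfl|rfl|rfl|rfl|rfl|rfl|rfl <;> decide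
  · simp only [List.mem_cons, List.not_mem_nil, or_false, not_or] at hs
    obtain ⟨n1, n2, n3, n4, n5, n6, n7, n8, n9, n10, n11, n12, n13, n14, n15, n16, n17, n18, n19, n20, n21⟩ := hs
    simp only [PySem.Dict.get?_mk_cons, beq_iff_eq, List.mem_cons, List.not_mem_nil, or_false]
    simp [PySem.Dict.get?, n1, n2, n3, n4, n5, n6, n7, n8, n9, n10, n11, n12, n13, n14, n15, n16, n17, n18, n19, n20, n21, eq_comm]

-- loop invariant: A's running-max totals are B's groups, each group reduced by max seeded 0
theorem totals_items_eq_groups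
    (l : List (String × Int)) (t : PySem.Dict String Int) (g : PySem.Dict String (List Int))
    (hnd : g.keys.Nodup)
    (hk : t.items = g.items.map (fun p => (p.1, p.2.foldl max 0))) :
    (l.foldl
      (fun (totals : PySem.Dict String Int) kv =>
        let canonical := pyCanonicalUsageKey kv.1
        if canonical = "" then totals
        else totals.insert canonical (max (totals.getD canonical 0) kv.2)) t).items
    = ((l.foldl
        (fun g kv =>
          match altAliases.get? (PySem.Str.lower kv.1) with
          | none => g
          | some canonical => g.insert canonical (g.getD canonical [] ++ [kv.2])) g).items).map
        (fun p => (p.1, p.2.foldl max 0)) := by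
  induction l generalizing t g with
  | nil => simpa using hk
  | cons kv rest ih =>
    simp only [List.foldl_cons]
    by_cases hz : pyCanonicalUsageKey kv.1 = ""
    · -- the key is not a usage key: both loops leave their dict unchanged
      have hget : altAliases.get? (PySem.Str.lower kv.1) = none := by
        rw [altAliases_get_eq_canon kv.1, if_pos hz]
      rw [if_pos hz, hget]
      exact ih t g hnd hk
    · -- usage key: A updates the running max, B appends to the group
      have hget : altAliases.get? (PySem.Str.lower kv.1) = some (pyCanonicalUsageKey kv.1) := by
        rw [altAliases_get_eq_canon kv.1, if_neg hz]
      rw [if_neg hz, hget]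
      set c := pyCanonicalUsageKey kv.1 with hcdef
      have hkeys : t.keys = g.keys := by
        simp only [PySem.Dict.keys, hk, List.map_map]; rfl
      have hndt : t.keys.Nodup := hkeys ▸ hnd
      have hcont : t.contains c = g.contains c := by
        rw [PySem.Dict.contains_eq_decide_mem_keys, PySem.Dict.contains_eq_decide_mem_keys, hkeys]
      apply ih
      · exact PySem.Dict.nodup_keys_insert _ _ _ hnd
      · by_cases hin : g.contains c = true
        · have htin : t.contains c = true := by rw [hcont, hin]
          rw [PySem.Dict.items_insert_of_contains _ _ htin,
              PySem.Dict.items_insert_of_contains _ _ hin, hk, List.map_map, List.map_map]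
          apply List.map_congr_left
          intro p hp
          by_cases hpc : p.1 = c
          · have hgD : g.getD c [] = p.2 := by
              have hp' : (c, p.2) ∈ g.items := by rw [← hpc]; exact hp
              exact PySem.Dict.getD_of_mem_items g hp' hnd []
            have htD : t.getD c 0 = p.2.foldl max 0 := by
              have hmem : (c, p.2.foldl max 0) ∈ t.items := by
                rw [hk]
                refine List.mem_map.mpr ⟨p, hp, ?_⟩
                rw [hpc]
              exact PySem.Dict.getD_of_mem_items t hmem hndt 0
            simp only [Function.comp, hpc, beq_self_eq_true, if_pos]
            simp [htD, hgD, List.foldl_append]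
          · simp only [Function.comp]
            rw [if_neg (by simpa using hpc), if_neg (by simpa using hpc)]
        · have hnin : g.contains c = false := by simpa using hin
          have htnin : t.contains c = false := by rw [hcont, hnin]
          rw [PySem.Dict.items_insert_of_not_contains _ _ htnin,
              PySem.Dict.items_insert_of_not_contains _ _ hnin, hk,
              PySem.Dict.getD_of_not_contains t 0 htnin, PySem.Dict.getD_of_not_contains g [] hnin]
          simp

-- ===== VERDICT (by name: the statement is the Claim_ definition above) =====
theorem map_top_level_usage_scalars_py_spec : Claim_equal_map_top_level_usage_scalars_py := by
  intro event _
  unfold Spec_map_top_level_usage_scalars_py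
  unfold map_top_level_usage_scalars_py map_top_level_usage_scalars_py_alt
  exact (totals_items_eq_groups event PySem.Dict.empty PySem.Dict.empty (by simp [pysem]) (by rfl)).symm ▸ rfl
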